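-- pv_equiv track=rewrite | github.com/danielchungdev/RIT | CSCI-141/PROJECT1/drop.py | search_for_drop
-- ===== SOURCE A (Python) =====
-- def search_for_drop(a_list):
--     """
--     This function looks for
--     the biggest possible drop.
--     In case that there is no
--     drop then it takes the
--     smallest positive number.
--     :param a_list:
--     :return drop_values [total, value1, value2]:
--     """
--     drop_values = []
--     biggest_drop = 100
--     value1_top = 0
--     value2_top = 0
--     for i in range(len(a_list)):
--         value1 = a_list[i]
--         for e in range(len(a_list)):
--             value2 = a_list[e]
--             new_drop = value2 - value1
--             if new_drop < biggest_drop and e > i: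
--                 biggest_drop = new_drop
--                 value1_top = value1
--                 value2_top = value2
--     drop_values.append(biggest_drop)
--     drop_values.append(value1_top)
--     drop_values.append(value2_top)
--     return drop_values
-- ===== SOURCE B (Python) =====
-- def search_for_drop(a_list):
--     """One pass: track the running maximum of earlier values; the best drop
--     at each position uses that maximum. Strict-improvement updates keep A's
--     tie-breaking."""
--     biggest_drop = 100
--     value1_top = 0
--     value2_top = 0
--     prefix_max = None
--     for value2 in a_list:
--         if prefix_max is not None:
--             new_drop = value2 - prefix_max
--             if new_drop < biggest_drop:
--                 biggest_drop = new_drop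
--                 value1_top = prefix_max
--                 value2_top = value2
--         if prefix_max is None or value2 > prefix_max:
--             prefix_max = value2
--     return [biggest_drop, value1_top, value2_top]
-- ===== Notes on version B (the rewrite author's own statement) =====
-- stated objective: faster
-- what changed: Replaced the O(n^2) all-pairs scan with a single pass that tracks the running maximum of earlier values and updates the best drop on strict improvement, preserving A's tie-breaking.
import Mathlib
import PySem

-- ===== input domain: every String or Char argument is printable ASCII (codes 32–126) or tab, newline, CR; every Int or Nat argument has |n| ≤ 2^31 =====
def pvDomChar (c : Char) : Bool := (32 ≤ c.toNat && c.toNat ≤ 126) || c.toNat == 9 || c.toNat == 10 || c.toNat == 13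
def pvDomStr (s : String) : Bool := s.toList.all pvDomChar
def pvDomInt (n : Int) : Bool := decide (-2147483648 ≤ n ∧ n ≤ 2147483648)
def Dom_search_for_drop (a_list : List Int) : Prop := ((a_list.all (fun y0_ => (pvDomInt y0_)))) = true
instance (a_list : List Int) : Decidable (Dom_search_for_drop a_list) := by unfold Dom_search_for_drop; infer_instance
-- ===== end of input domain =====

-- B replaces A's all-pairs scan by a single pass tracking the running maximum of earlier values.

-- ===== PORT A =====
def search_for_drop (a_list : List Int) : List Int :=
  let st :=
    (PySem.List.pyRange 0 (PySem.List.len a_list) 1).foldl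
      (fun (st : Int × Int × Int) i =>
        let value1 := PySem.List.pyGetD a_list i 0
        (PySem.List.pyRange 0 (PySem.List.len a_list) 1).foldl
          (fun (st : Int × Int × Int) e =>
            let value2 := PySem.List.pyGetD a_list e 0
            let new_drop := value2 - value1
            if new_drop < st.1 ∧ e > i then (new_drop, value1, value2) else st)
          st)
      (100, 0, 0)
  [st.1, st.2.1, st.2.2]

-- ===== PORT B =====
-- one step of B's single pass: try the candidate drop against the running max, then update the running max
def bstep (st : (Int × Int × Int) × Option Int) (value2 : Int) : (Int × Int × Int) × Option Int :=
  let st1 :=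
    match st.2 with
    | some m =>
      let new_drop := value2 - m
      if new_drop < st.1.1 then ((new_drop, m, value2), st.2) else st
    | none => st
  match st1.2 with
  | some m => if value2 > m then (st1.1, some value2) else st1
  | none => (st1.1, some value2)

def search_for_drop_alt (a_list : List Int) : List Int :=
  let st := a_list.foldl bstep ((100, 0, 0), none)
  [st.1.1, st.1.2.1, st.1.2.2]

-- ===== PRECONDITION & SPEC =====
def Spec_search_for_drop (a_list : List Int) (out : List Int) : Prop := out = search_for_drop_alt a_list
instance (a_list : List Int) (out : List Int) : Decidable (Spec_search_for_drop a_list out) := by unfold Spec_search_for_drop; infer_instance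

-- ===== CLAIM (what is proved, stated in full; the proofs are below) =====
def Claim_equal_search_for_drop : Prop := ∀ (a_list : List Int), Dom_search_for_drop a_list → Spec_search_for_drop a_list (search_for_drop a_list)

-- ===== LEMMAS AND PROOFS =====

-- strict-improvement update on (key, v1, v2) candidates
def pvUpd (s c : Int × Int × Int) : Int × Int × Int := if c.1 < s.1 then c else s

-- B's candidate stream: one candidate per element, keyed on the running max of earlier values
def pvCands (m : Int) : List Int → List (Int × Int × Int)
  | [] => []
  | y :: ys => (y - m, m, y) :: pvCands (max m y) ys

-- A's candidate stream: all ordered pairs in lexicographic order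
def pvCandsA (xs : List Int) : List (Int × Int × Int) :=
  (List.range xs.length).flatMap (fun i =>
    ((List.range xs.length).filter (fun e => i < e)).map
      (fun e => (xs.getD e 0 - xs.getD i 0, xs.getD i 0, xs.getD e 0)))

def pvG (xs : List Int) (k : Nat) : Int := xs.getD k 0
def pvQ (xs : List Int) (e : Nat) : Int := (xs.take e).foldl max (xs.getD 0 0)
def pvCandE (xs : List Int) (e : Nat) : Int × Int × Int :=
  (pvG xs e - pvQ xs e, pvQ xs e, pvG xs e)

theorem pvUpd_foldl_id (C : List (Int × Int × Int)) (s : Int × Int × Int)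
    (h : ∀ c ∈ C, s.1 ≤ c.1) : C.foldl pvUpd s = s := by
  induction C with
  | nil => rfl
  | cons c C ih =>
    have h1 : pvUpd s c = s := by
      have hc := h c List.mem_cons_self
      unfold pvUpd
      split_ifs with hif
      · exact absurd hif (by omega)
      · rfl
    rw [List.foldl_cons, h1]
    exact ih (fun c' hc' => h c' (List.mem_cons_of_mem _ hc'))

theorem pvUpd_foldl_mem (C : List (Int × Int × Int)) (s : Int × Int × Int) :
    C.foldl pvUpd s = s ∨ C.foldl pvUpd s ∈ C := by
  induction C generalizing s with
  | nil => left; rfl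
  | cons c C ih =>
    rw [List.foldl_cons]
    rcases ih (pvUpd s c) with h | h
    · rw [h]; unfold pvUpd; split_ifs with hc
      · right; exact List.mem_cons_self
      · left; rfl
    · right; exact List.mem_cons_of_mem _ h

theorem pvUpd_foldl_first (C1 : List (Int × Int × Int)) (c : Int × Int × Int)
    (C2 : List (Int × Int × Int)) (s : Int × Int × Int) (hs : c.1 < s.1)
    (h1 : ∀ c' ∈ C1, c.1 < c'.1) (h2 : ∀ c' ∈ C2, c.1 ≤ c'.1) :
    (C1 ++ c :: C2).foldl pvUpd s = c := by
  rw [List.foldl_append, List.foldl_cons]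
  have hkey : c.1 < (C1.foldl pvUpd s).1 := by
    rcases pvUpd_foldl_mem C1 s with h | h
    · rw [h]; exact hs
    · exact h1 _ h
  have hupd : pvUpd (C1.foldl pvUpd s) c = c := by
    unfold pvUpd
    split_ifs with hif
    · rfl
    · exact absurd hkey hif
  rw [hupd]
  exact pvUpd_foldl_id C2 c h2

theorem pvQ_succ (xs : List Int) (e : Nat) (h : e < xs.length) :
    pvQ xs (e + 1) = max (pvQ xs e) (pvG xs e) := by
  unfold pvQ pvG
  rw [List.take_add_one, List.getElem?_eq_getElem h, List.foldl_append]
  simp only [Option.toList_some, List.foldl_cons, List.foldl_nil, List.getD_eq_getElem?_getD,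
    List.getElem?_eq_getElem h, Option.getD_some]

theorem pvQ_mono (xs : List Int) (e e' : Nat) (h : e ≤ e') :
    e' ≤ xs.length → pvQ xs e ≤ pvQ xs e' := by
  induction e', h using Nat.le_induction with
  | base => intro _; exact le_refl _
  | succ m hm ih =>
    intro h2
    refine le_trans (ih (by omega)) ?_
    rw [pvQ_succ xs m (by omega)]
    exact le_max_left _ _

theorem pvG_le_pvQ (xs : List Int) (i e : Nat) (h : i < e) (h2 : e ≤ xs.length) :
    pvG xs i ≤ pvQ xs e := by
  have h3 : pvG xs i ≤ pvQ xs (i + 1) := by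
    rw [pvQ_succ xs i (by omega)]; exact le_max_right _ _
  exact le_trans h3 (pvQ_mono xs (i + 1) e (by omega) h2)

theorem pvQ_attained (xs : List Int) (e : Nat) (h1 : 1 ≤ e) (h2 : e ≤ xs.length) :
    ∃ i, i < e ∧ pvG xs i = pvQ xs e := by
  induction e with
  | zero => omega
  | succ e ih =>
    by_cases he : e = 0
    · subst he
      refine ⟨0, by omega, ?_⟩
      rw [pvQ_succ xs 0 (by omega)]
      have h0 : pvQ xs 0 = pvG xs 0 := rfl
      rw [h0, max_self]
    · obtain ⟨i, hi, hgi⟩ := ih (by omega) (by omega)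
      rw [pvQ_succ xs e (by omega)]
      rcases le_total (pvG xs e) (pvQ xs e) with hle | hle
      · exact ⟨i, by omega, by rw [max_eq_left hle]; exact hgi⟩
      · exact ⟨e, by omega, (max_eq_right hle).symm⟩

theorem pvCands_eq (ys : List Int) : ∀ (m : Int),
    pvCands m ys = (List.range ys.length).map
      (fun k => (ys.getD k 0 - (ys.take k).foldl max m, (ys.take k).foldl max m, ys.getD k 0)) := by
  induction ys with
  | nil => intro m; rfl
  | cons y ys ih =>
    intro m
    show (y - m, m, y) :: pvCands (max m y) ys = _
    rw [show (y :: ys).length = ys.length + 1 from rfl, List.range_succ_eq_map,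
        List.map_cons, List.map_map, ih (max m y)]
    congr 1

theorem pvCands_candE (x : Int) (rest : List Int) :
    pvCands x rest = (List.range rest.length).map (fun k => pvCandE (x :: rest) (k + 1)) := by
  rw [pvCands_eq]
  apply List.map_congr_left
  intro k _
  simp [pvCandE, pvQ, pvG, List.take_succ_cons, List.getD_eq_getElem?_getD, max_self]

theorem pv_foldl_guard (f : Nat → Int × Int × Int) (p : Nat → Prop) [DecidablePred p]
    (l : List Nat) (s : Int × Int × Int) :
    l.foldl (fun st e => if (f e).1 < st.1 ∧ p e then f e else st) s
      = ((l.filter (fun e => p e)).map f).foldl pvUpd s := by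
  induction l generalizing s with
  | nil => rfl
  | cons e l ih =>
    by_cases hp : p e
    · have hstep : (if (f e).1 < s.1 ∧ p e then f e else s) = pvUpd s (f e) := by
        unfold pvUpd; by_cases h : (f e).1 < s.1 <;> simp [h, hp]
      rw [List.foldl_cons, hstep, List.filter_cons,
        if_pos (show decide (p e) = true from by simp [hp]), List.map_cons, List.foldl_cons, ih]
    · have hstep : (if (f e).1 < s.1 ∧ p e then f e else s) = s := by simp [hp]
      rw [List.foldl_cons, hstep, List.filter_cons,
        if_neg (show ¬ decide (p e) = true from by simp [hp]), ih]

theorem pv_range_split (n a : Nat) (h : a < n) :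
    List.range n = List.range a ++ a :: List.range' (a + 1) (n - a - 1) := by
  have h1 := @List.range'_append 0 a (n - a) 1
  simp only [Nat.zero_add, Nat.one_mul] at h1
  rw [show n - a = (n - a - 1) + 1 from by omega, List.range'_succ] at h1
  rw [List.range_eq_range', List.range_eq_range']
  conv_lhs => rw [show n = a + (n - a - 1 + 1) from by omega]
  rw [← h1]

theorem pv_exists_argmin (f : Nat → Int) (a : Nat) : ∀ (b : Nat), a < b →
    ∃ e, a ≤ e ∧ e < b ∧ ∀ e', a ≤ e' → e' < b → f e ≤ f e' := by
  intro b
  induction b with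
  | zero => omega
  | succ b ih =>
    intro h
    by_cases hab : a < b
    · obtain ⟨e, h1, h2, h3⟩ := ih hab
      rcases le_total (f e) (f b) with hf | hf
      · refine ⟨e, h1, by omega, fun e' h4 h5 => ?_⟩
        rcases Nat.lt_succ_iff_lt_or_eq.mp h5 with h6 | h6
        · exact h3 e' h4 h6
        · exact le_of_le_of_eq hf (by rw [h6])
      · refine ⟨b, by omega, by omega, fun e' h4 h5 => ?_⟩
        rcases Nat.lt_succ_iff_lt_or_eq.mp h5 with h6 | h6
        · exact le_trans hf (h3 e' h4 h6)
        · exact le_of_eq (by rw [h6])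
    · refine ⟨a, le_refl a, by omega, fun e' h4 h5 => ?_⟩
      exact le_of_eq (by rw [show e' = a from by omega])

theorem A_eq_fold (xs : List Int) :
    search_for_drop xs =
      [(List.foldl pvUpd (100, 0, 0) (pvCandsA xs)).1,
       (List.foldl pvUpd (100, 0, 0) (pvCandsA xs)).2.1,
       (List.foldl pvUpd (100, 0, 0) (pvCandsA xs)).2.2] := by
  have h2 : ∀ (st : Int × Int × Int) (i : Nat),
      List.foldl (fun st e =>
          if xs.getD e 0 - xs.getD i 0 < st.1 ∧ i < e then
            (xs.getD e 0 - xs.getD i 0, xs.getD i 0, xs.getD e 0) else st) st (List.range xs.length)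
      = List.foldl pvUpd st (((List.range xs.length).filter (fun e => i < e)).map
          (fun e => (xs.getD e 0 - xs.getD i 0, xs.getD i 0, xs.getD e 0))) := by
    intro st i
    exact pv_foldl_guard (fun e => (xs.getD e 0 - xs.getD i 0, xs.getD i 0, xs.getD e 0))
      (fun e => i < e) (List.range xs.length) st
  unfold search_for_drop pvCandsA
  rw [List.foldl_flatMap]
  simp only [PySem.List.len_eq, PySem.List.pyRange_zero_nat, List.foldl_map,
    PySem.List.pyGetD_natCast, gt_iff_lt, Nat.cast_lt]
  simp only [h2]
  simp only [List.foldl_map]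

theorem bstep_some (s : Int × Int × Int) (m y : Int) :
    bstep (s, some m) y = (pvUpd s (y - m, m, y), some (max m y)) := by
  unfold bstep pvUpd
  by_cases h1 : y - m < s.1 <;> by_cases h2 : y > m <;>
    simp [h1, h2] <;> omega

theorem B_foldl (ys : List Int) : ∀ (s : Int × Int × Int) (m : Int),
    ys.foldl bstep (s, some m) = (List.foldl pvUpd s (pvCands m ys), some (ys.foldl max m)) := by
  induction ys with
  | nil => intro s m; rfl
  | cons y ys ih =>
    intro s m
    rw [List.foldl_cons, bstep_some, ih]
    rfl

theorem B_eq_fold (x : Int) (rest : List Int) :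
    search_for_drop_alt (x :: rest) =
      [(List.foldl pvUpd (100, 0, 0) (pvCands x rest)).1,
       (List.foldl pvUpd (100, 0, 0) (pvCands x rest)).2.1,
       (List.foldl pvUpd (100, 0, 0) (pvCands x rest)).2.2] := by
  unfold search_for_drop_alt
  rw [List.foldl_cons, show bstep ((100, 0, 0), none) x = ((100, 0, 0), some x) from rfl,
    B_foldl]

theorem main_cands_eq (x : Int) (rest : List Int) :
    List.foldl pvUpd (100, 0, 0) (pvCandsA (x :: rest)) =
      List.foldl pvUpd (100, 0, 0) (pvCands x rest) := by
  classical
  set xs := x :: rest with hxs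
  have hn1 : xs.length = rest.length + 1 := by simp [hxs]
  have hB : pvCands x rest = (List.range rest.length).map (fun k => pvCandE xs (k + 1)) :=
    pvCands_candE x rest
  by_cases hyes : ∃ e, 1 ≤ e ∧ e < xs.length ∧ pvG xs e - pvQ xs e < 100
  · -- there is a pair with drop < 100
    obtain ⟨e1, he1a, he1b, he1c⟩ := hyes
    have hPex : ∃ e, 1 ≤ e ∧ e < xs.length ∧
        ∀ e', 1 ≤ e' → e' < xs.length → pvG xs e - pvQ xs e ≤ pvG xs e' - pvQ xs e' := by
      obtain ⟨e0, h1, h2, h3⟩ := pv_exists_argmin (fun e => pvG xs e - pvQ xs e) 1 xs.length (by omega)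
      exact ⟨e0, h1, h2, h3⟩
    obtain ⟨estar, hes1, hes2, hesmin, hesleast⟩ :
        ∃ e, 1 ≤ e ∧ e < xs.length ∧
          (∀ e', 1 ≤ e' → e' < xs.length → pvG xs e - pvQ xs e ≤ pvG xs e' - pvQ xs e') ∧
          (∀ e'', e'' < e → ¬ (1 ≤ e'' ∧ e'' < xs.length ∧
            ∀ e', 1 ≤ e' → e' < xs.length → pvG xs e'' - pvQ xs e'' ≤ pvG xs e' - pvQ xs e')) :=
      ⟨Nat.find hPex, (Nat.find_spec hPex).1, (Nat.find_spec hPex).2.1,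
        (Nat.find_spec hPex).2.2, fun e'' h => Nat.find_min hPex h⟩
    have hM100 : pvG xs estar - pvQ xs estar < 100 :=
      lt_of_le_of_lt (hesmin e1 he1a he1b) he1c
    have hatt : ∃ i, pvG xs i = pvQ xs estar := by
      obtain ⟨i, _, h⟩ := pvQ_attained xs estar hes1 (by omega)
      exact ⟨i, h⟩
    obtain ⟨istar, histar_eq, histarleast⟩ :
        ∃ i, pvG xs i = pvQ xs estar ∧ ∀ j, j < i → pvG xs j ≠ pvQ xs estar :=
      ⟨Nat.find hatt, Nat.find_spec hatt, fun j hj => Nat.find_min hatt hj⟩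
    have histar_lt : istar < estar := by
      obtain ⟨i0, hi0, h0⟩ := pvQ_attained xs estar hes1 (by omega)
      have : ¬ (i0 < istar) := fun hlt => histarleast i0 hlt h0
      omega
    have K2 : ∀ e, 1 ≤ e → e < estar → pvG xs estar - pvQ xs estar < pvG xs e - pvQ xs e := by
      intro e h1e h2e
      by_cases h : pvG xs estar - pvQ xs estar < pvG xs e - pvQ xs e
      · exact h
      · exfalso
        have hkey : pvG xs e - pvQ xs e = pvG xs estar - pvQ xs estar := by
          have := hesmin e h1e (by omega); omega
        exact hesleast e h2e ⟨h1e, by omega, fun e' h1' h2' => by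
          rw [hkey]; exact hesmin e' h1' h2'⟩
    have K3 : ∀ i e, i < e → e < xs.length →
        pvG xs estar - pvQ xs estar ≤ pvG xs e - pvG xs i := by
      intro i e hie hen
      have h1 := pvG_le_pvQ xs i e hie (by omega)
      have h2 := hesmin e (by omega) hen
      omega
    have K4 : ∀ i e, i < e → e < xs.length → (i < istar ∨ (i = istar ∧ e < estar)) →
        pvG xs estar - pvQ xs estar < pvG xs e - pvG xs i := by
      intro i e hie hen hcase
      by_cases h : pvG xs estar - pvQ xs estar < pvG xs e - pvG xs i
      · exact h
      exfalso
      have heq : pvG xs e - pvG xs i = pvG xs estar - pvQ xs estar := by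
        have := K3 i e hie hen; omega
      have hq1 : pvG xs i ≤ pvQ xs e := pvG_le_pvQ xs i e hie (by omega)
      have hq2 : pvG xs estar - pvQ xs estar ≤ pvG xs e - pvQ xs e := hesmin e (by omega) hen
      have hq3 : pvG xs i = pvQ xs e := by omega
      have hee : ¬ (e < estar) := by
        intro hlt
        have := K2 e (by omega) hlt
        omega
      rcases hcase with hi | ⟨hi, he⟩
      · have hie2 : i < estar := by omega
        have hmono : pvQ xs estar ≤ pvQ xs e := pvQ_mono xs estar e (by omega) (by omega)
        have hup : pvG xs i ≤ pvQ xs estar := pvG_le_pvQ xs i estar hie2 (by omega)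
        exact histarleast i hi (by omega)
      · exact hee he
    -- B side: the winner is the candidate at estar
    have hBres : List.foldl pvUpd (100, 0, 0) (pvCands x rest) =
        (pvG xs estar - pvQ xs estar, pvQ xs estar, pvG xs estar) := by
      rw [hB, pv_range_split rest.length (estar - 1) (by omega), List.map_append, List.map_cons]
      rw [show pvCandE xs (estar - 1 + 1) =
            (pvG xs estar - pvQ xs estar, pvQ xs estar, pvG xs estar) from by
          rw [show estar - 1 + 1 = estar from by omega]; rfl]
      apply pvUpd_foldl_first
      · exact hM100
      · intro c' hc'
        rw [List.mem_map] at hc'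
        obtain ⟨k, hk, rfl⟩ := hc'
        rw [List.mem_range] at hk
        have := K2 (k + 1) (by omega) (by omega)
        simpa [pvCandE] using this
      · intro c' hc'
        rw [List.mem_map] at hc'
        obtain ⟨k, hk, rfl⟩ := hc'
        rw [List.mem_range'_1] at hk
        have := hesmin (k + 1) (by omega) (by omega)
        simpa [pvCandE] using this
    -- A side: the winner is the pair (istar, estar)
    have hAres : List.foldl pvUpd (100, 0, 0) (pvCandsA xs) =
        (pvG xs estar - pvG xs istar, pvG xs istar, pvG xs estar) := by
      have hA0 : pvCandsA xs = (List.range xs.length).flatMap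
          (fun i => ((List.range xs.length).filter (fun e => i < e)).map
            (fun e => (pvG xs e - pvG xs i, pvG xs i, pvG xs e))) := rfl
      rw [hA0]
      set blk := fun (i : Nat) => ((List.range xs.length).filter (fun e => i < e)).map
        (fun e => (pvG xs e - pvG xs i, pvG xs i, pvG xs e)) with hblk
      rw [pv_range_split xs.length istar (by omega), List.flatMap_append, List.flatMap_cons]
      have hBi : blk istar =
          (((List.range estar).filter (fun e => istar < e)).map
              (fun e => (pvG xs e - pvG xs istar, pvG xs istar, pvG xs e)))
            ++ (pvG xs estar - pvG xs istar, pvG xs istar, pvG xs estar)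
            :: (((List.range' (estar + 1) (xs.length - estar - 1)).filter (fun e => istar < e)).map
              (fun e => (pvG xs e - pvG xs istar, pvG xs istar, pvG xs e))) := by
        rw [hblk]
        simp only []
        rw [pv_range_split xs.length estar (by omega), List.filter_append, List.filter_cons,
          if_pos (by simpa using histar_lt), List.map_append, List.map_cons]
      rw [hBi]
      simp only [List.append_assoc, List.cons_append]
      rw [← List.append_assoc]
      apply pvUpd_foldl_first
      · show pvG xs estar - pvG xs istar < 100
        rw [histar_eq]; exact hM100
      · intro c' hc'
        rw [List.mem_append] at hc'
        rcases hc' with hc' | hc'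
        · rw [List.mem_flatMap] at hc'
          obtain ⟨i, hi, hc'⟩ := hc'
          rw [List.mem_range] at hi
          rw [hblk] at hc'
          simp only [List.mem_map, List.mem_filter, List.mem_range] at hc'
          obtain ⟨e, ⟨hen, hie⟩, rfl⟩ := hc'
          show pvG xs estar - pvG xs istar < pvG xs e - pvG xs i
          rw [histar_eq]
          exact K4 i e (by simpa using hie) hen (Or.inl hi)
        · simp only [List.mem_map, List.mem_filter, List.mem_range] at hc'
          obtain ⟨e, ⟨hee, hie⟩, rfl⟩ := hc'
          show pvG xs estar - pvG xs istar < pvG xs e - pvG xs istar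
          have hh := K4 istar e (by simpa using hie) (by omega) (Or.inr ⟨rfl, hee⟩)
          omega
      · intro c' hc'
        rw [List.mem_append] at hc'
        rcases hc' with hc' | hc'
        · simp only [List.mem_map, List.mem_filter, List.mem_range'_1] at hc'
          obtain ⟨e, ⟨hee, hie⟩, rfl⟩ := hc'
          show pvG xs estar - pvG xs istar ≤ pvG xs e - pvG xs istar
          have hh := K3 istar e (by simpa using hie) (by omega)
          omega
        · rw [List.mem_flatMap] at hc'
          obtain ⟨i, hi, hc'⟩ := hc'
          rw [List.mem_range'_1] at hi
          rw [hblk] at hc'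
          simp only [List.mem_map, List.mem_filter, List.mem_range] at hc'
          obtain ⟨e, ⟨hen, hie⟩, rfl⟩ := hc'
          show pvG xs estar - pvG xs istar ≤ pvG xs e - pvG xs i
          rw [histar_eq]
          exact K3 i e (by simpa using hie) hen
    rw [hAres, hBres, histar_eq]
  · -- no pair has a drop below 100: both folds keep the initial state
    have hyes' : ∀ e, 1 ≤ e → e < xs.length → ¬ (pvG xs e - pvQ xs e < 100) :=
      fun e h1 h2 h3 => hyes ⟨e, h1, h2, h3⟩
    have hA : List.foldl pvUpd (100, 0, 0) (pvCandsA xs) = (100, 0, 0) := by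
      apply pvUpd_foldl_id
      intro c hc
      unfold pvCandsA at hc
      rw [List.mem_flatMap] at hc
      obtain ⟨i, _, hc⟩ := hc
      simp only [List.mem_map, List.mem_filter, List.mem_range] at hc
      obtain ⟨e, ⟨hen, hie⟩, rfl⟩ := hc
      have hie' : i < e := by simpa using hie
      have h100 := hyes' e (by omega) hen
      have hle := pvG_le_pvQ xs i e hie' (by omega)
      show (100 : Int) ≤ xs.getD e 0 - xs.getD i 0
      simp only [pvG] at h100 hle
      omega
    have hBr : List.foldl pvUpd (100, 0, 0) (pvCands x rest) = (100, 0, 0) := by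
      rw [hB]
      apply pvUpd_foldl_id
      intro c hc
      rw [List.mem_map] at hc
      obtain ⟨k, hk, rfl⟩ := hc
      rw [List.mem_range] at hk
      have h := hyes' (k + 1) (by omega) (by omega)
      simp only [not_lt] at h
      simpa [pvCandE] using h
    rw [hA, hBr]

-- ===== VERDICT (by name: the statement is the Claim_ definition above) =====
theorem search_for_drop_spec : Claim_equal_search_for_drop := by
  intro a_list _
  unfold Spec_search_for_drop
  cases a_list with
  | nil => decide
  | cons x rest =>
    rw [A_eq_fold, B_eq_fold, main_cands_eq]
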